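-- pv_equiv track=rewrite | github.com/apiksdev/axel-core | skills/skill-axel-core/scripts/axel_compact.py | filter_elements
-- ===== SOURCE A (Python) =====
-- def filter_elements(elements: list[dict], filters: list[tuple[str, str]]) -> list[dict]:
--     """Filter elements by attribute values.
--
--     OR logic: element matches if ANY filter condition is true.
--     """
--     if not filters:
--         return elements
--
--     matched = []
--     for elem in elements:
--         for attr, value in filters:
--             if elem["attrs"].get(attr) == value:
--                 matched.append(elem)
--                 break  # OR logic - match any filter
--
--     return matched
-- ===== SOURCE B (Python) =====
-- def filter_elements(elements: list[dict], filters: list[tuple[str, str]]) -> list[dict]: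
--     """Filter elements by attribute values (OR logic), via a hash set of filter pairs."""
--     if not filters:
--         return elements
--     filter_set = set(filters)
--     return [elem for elem in elements
--             if any((attr, value) in filter_set
--                    for attr, value in elem["attrs"].items())]
-- ===== Notes on version B (the rewrite author's own statement) =====
-- stated objective: alternative
-- what changed: B inverts the scan: instead of probing the element's attrs dict once per filter, it builds a hash set of the filter pairs once and makes a single pass over each element's own attribute items testing set membership, selecting via a list comprehension instead of an append/break loop.
import Mathlib
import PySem

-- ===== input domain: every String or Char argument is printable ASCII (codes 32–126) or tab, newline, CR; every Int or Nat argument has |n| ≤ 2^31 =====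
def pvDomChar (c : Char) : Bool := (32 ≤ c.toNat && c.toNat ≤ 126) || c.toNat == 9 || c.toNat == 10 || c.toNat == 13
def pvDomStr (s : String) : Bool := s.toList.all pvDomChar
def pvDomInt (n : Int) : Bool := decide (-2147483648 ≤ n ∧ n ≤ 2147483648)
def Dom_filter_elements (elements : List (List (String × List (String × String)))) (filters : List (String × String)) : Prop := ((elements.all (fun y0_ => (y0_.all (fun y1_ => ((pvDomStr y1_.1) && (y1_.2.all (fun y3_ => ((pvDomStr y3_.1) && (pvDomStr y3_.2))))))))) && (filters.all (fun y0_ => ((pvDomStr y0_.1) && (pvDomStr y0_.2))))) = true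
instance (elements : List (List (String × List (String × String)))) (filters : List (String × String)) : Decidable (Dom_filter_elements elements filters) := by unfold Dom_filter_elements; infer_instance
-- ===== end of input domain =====

-- One honest line: B replaces A's per-filter probing of each element's attrs dict by one pass
-- over the element's own attribute items against a set of the filter pairs (alternative decomposition).

-- ===== PORT A =====
-- inner 'for attr, value in filters: if elem["attrs"].get(attr) == value: … break'
def pvAInner (attrs : List (String × String)) : List (String × String) → Bool
  | [] => false
  | (attr, value) :: rest =>
      if attrs.lookup attr = some value then true else pvAInner attrs rest

def filter_elements (elements : List (List (String × List (String × String)))) (filters : List (String × String)) : List (List (String × List (String × String))) :=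
  if filters = [] then elements
  else
    elements.foldl (fun matched elem =>
      if pvAInner ((elem.lookup "attrs").getD []) filters then matched ++ [elem] else matched) []

-- ===== PORT B =====
def filter_elements_alt (elements : List (List (String × List (String × String)))) (filters : List (String × String)) : List (List (String × List (String × String))) :=
  if filters = [] then elements
  else
    let filterSet : PySem.Set (String × String) := PySem.Set.ofList filters
    elements.filter (fun elem =>
      ((elem.lookup "attrs").getD []).any (fun kv => PySem.Set.contains filterSet kv))

-- ===== PRECONDITION & SPEC =====
-- Pre_ excludes (when filters is nonempty) elements without an "attrs" key, on which A raises
-- KeyError, and attrs association lists with duplicate keys, which do not represent any Python dict.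
def Pre_filter_elements (elements : List (List (String × List (String × String)))) (filters : List (String × String)) : Prop :=
  filters = [] ∨ ∀ elem ∈ elements,
    (elem.lookup "attrs").isSome = true ∧ (((elem.lookup "attrs").getD []).map Prod.fst).Nodup
instance (elements : List (List (String × List (String × String)))) (filters : List (String × String)) : Decidable (Pre_filter_elements elements filters) := by unfold Pre_filter_elements; infer_instance

def pvWitness_filter_elements : (List (List (String × List (String × String)))) × (List (String × String)) :=
  ([[("attrs", [("a", "x"), ("b", "y")])], [("attrs", [("b", "x")])]], [("a", "x"), ("c", "z")])

def Spec_filter_elements (elements : List (List (String × List (String × String)))) (filters : List (String × String)) (out : List (List (String × List (String × String)))) : Prop := out = filter_elements_alt elements filters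
instance (elements : List (List (String × List (String × String)))) (filters : List (String × String)) (out : List (List (String × List (String × String)))) : Decidable (Spec_filter_elements elements filters out) := by unfold Spec_filter_elements; infer_instance

-- ===== CLAIM (what is proved, stated in full; the proofs are below) =====
def Claim_equal_filter_elements : Prop := ∀ (elements : List (List (String × List (String × String)))) (filters : List (String × String)), Dom_filter_elements elements filters → Pre_filter_elements elements filters → Spec_filter_elements elements filters (filter_elements elements filters)

-- ===== LEMMAS AND PROOFS =====

-- with nodup keys, first-match lookup success is plain membership
lemma lookup_eq_some_iff_mem (attrs : List (String × String)) (h : (attrs.map Prod.fst).Nodup)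
    (a v : String) : attrs.lookup a = some v ↔ (a, v) ∈ attrs := by
  induction attrs with
  | nil => simp [List.lookup]
  | cons p rest ih =>
      obtain ⟨k, w⟩ := p
      simp only [List.map_cons, List.nodup_cons] at h
      by_cases hk : a = k
      · subst hk
        simp only [List.lookup, beq_self_eq_true, Option.some.injEq, List.mem_cons,
          Prod.mk.injEq, true_and]
        constructor
        · intro h'; exact Or.inl h'.symm
        · rintro (h' | h')
          · exact h'.symm
          · exact absurd (List.mem_map.mpr ⟨_, h', rfl⟩) h.1
      · simp only [List.lookup, beq_eq_false_iff_ne.mpr hk, List.mem_cons, Prod.mk.injEq]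
        rw [ih h.2]
        constructor
        · exact Or.inr
        · rintro (⟨h', _⟩ | h')
          · exact absurd h' hk
          · exact h'

-- A's inner break-loop succeeds iff some filter pair names the first-match value
lemma pvAInner_iff (attrs filters : List (String × String)) :
    pvAInner attrs filters = true ↔ ∃ p ∈ filters, attrs.lookup p.1 = some p.2 := by
  induction filters with
  | nil => simp [pvAInner]
  | cons p rest ih =>
      obtain ⟨a, v⟩ := p
      simp only [pvAInner, List.mem_cons]
      split_ifs with h
      · simp only [true_iff]
        exact ⟨(a, v), Or.inl rfl, h⟩
      · rw [ih]
        constructor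
        · rintro ⟨q, hq, hq'⟩; exact ⟨q, Or.inr hq, hq'⟩
        · rintro ⟨q, hq | hq, hq'⟩
          · cases hq; exact absurd hq' h
          · exact ⟨q, hq, hq'⟩

-- pointwise agreement of the two per-element tests
lemma test_eq (attrs filters : List (String × String)) (h : (attrs.map Prod.fst).Nodup) :
    pvAInner attrs filters
      = attrs.any (fun kv => PySem.Set.contains (PySem.Set.ofList filters) kv) := by
  rw [Bool.eq_iff_iff, pvAInner_iff, List.any_eq_true]
  constructor
  · rintro ⟨⟨a, v⟩, hp, hl⟩
    refine ⟨(a, v), (lookup_eq_some_iff_mem attrs h a v).mp hl, ?_⟩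
    rw [PySem.Set.contains_iff, PySem.Set.mem_ofList]; exact hp
  · rintro ⟨⟨a, v⟩, hm, hc⟩
    rw [PySem.Set.contains_iff, PySem.Set.mem_ofList] at hc
    exact ⟨(a, v), hc, (lookup_eq_some_iff_mem attrs h a v).mpr hm⟩

-- ===== VERDICT (by name: the statement is the Claim_ definition above) =====
theorem filter_elements_spec : Claim_equal_filter_elements := by
  intro elements filters _ hpre
  unfold Spec_filter_elements filter_elements filter_elements_alt
  by_cases hf : filters = []
  · simp [hf]
  · simp only [hf, if_false]
    rcases hpre with hpre | hpre
    · exact absurd hpre hf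
    rw [PySem.List.foldl_append_if_eq_filter, List.nil_append]
    apply List.filter_congr
    intro elem hmem
    exact test_eq _ _ (hpre elem hmem).2
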